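-- pv_equiv track=rewrite | github.com/gradinarualex/advent-of-code-2020 | day_17/conway_cubes.py | next_state_3d
-- ===== SOURCE A (Python) =====
-- def get_neighbors_3d(coords):
--     z, y, x = coords
--     neighbor_offsets = [-1, 0, 1]
--
--     neighbor_list = []
--     for z_offset in neighbor_offsets:
--         z_idx = z + z_offset
--         for y_offset in neighbor_offsets:
--             y_idx = y + y_offset
--             for x_offset in neighbor_offsets:
--                 x_idx = x + x_offset
--                 if not (z_offset == y_offset == x_offset == 0):
--                     neighbor = (z_idx, y_idx, x_idx)
--                     neighbor_list.append(neighbor)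
--
--     return neighbor_list
--
-- def count_neighbors(space, neighbors):
--     neighbors_count = 0
--
--     for neighbor in neighbors:
--         if neighbor in space:
--             if space[neighbor] == True:
--                 neighbors_count += 1
--
--     return neighbors_count
--
-- def expand_space_3d(space):
--     new_space = space.copy()
--
--     for cube in space.keys():
--         neighbors = get_neighbors_3d(cube)
--         for neighbor in neighbors:
--             if not (neighbor in space.keys()):
--                 new_space[neighbor] = False
--
--     return new_space
--
-- def next_state_3d(space):
--
--     new_space = space.copy()
--
--     # expand space
--     new_space = expand_space_3d(new_space)
--
--     # make changes based on rules
--     for cube in new_space.keys():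
--         neighbors = get_neighbors_3d(cube)
--         neighbors_count = count_neighbors(space, neighbors)
--
--         if (new_space[cube] == True) and (neighbors_count not in [2, 3]):
--             new_space[cube] = False
--         elif (new_space[cube] == False) and (neighbors_count == 3):
--             new_space[cube] = True
--
--     return new_space
-- ===== SOURCE B (Python) =====
-- # Scatter-count re-implementation: one pass over active cells increments a
-- # neighbor counter; the key set is built as keys + first-seen neighbors; each
-- # output cell is then decided by a closed-form rule lookup (alternative algorithm).
--
-- _OFFSETS = [(dz, dy, dx)
--             for dz in (-1, 0, 1)
--             for dy in (-1, 0, 1)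
--             for dx in (-1, 0, 1)
--             if (dz, dy, dx) != (0, 0, 0)]
--
--
-- def next_state_3d(space):
--     # scatter: each active cell adds 1 to all 26 neighbors
--     counter = {}
--     for cube, active in space.items():
--         if active:
--             for dz, dy, dx in _OFFSETS:
--                 n = (cube[0] + dz, cube[1] + dy, cube[2] + dx)
--                 counter[n] = counter.get(n, 0) + 1
--     # key set: existing keys, then neighbors of every key in first-seen order
--     coords = list(space.keys())
--     seen = set(coords)
--     for cube in space.keys():
--         for dz, dy, dx in _OFFSETS:
--             n = (cube[0] + dz, cube[1] + dy, cube[2] + dx)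
--             if n not in seen:
--                 seen.add(n)
--                 coords.append(n)
--     result = {}
--     for c in coords:
--         cnt = counter.get(c, 0)
--         cur = space.get(c, False)
--         result[c] = cnt == 3 or (cur and cnt == 2)
--     return result
-- ===== Notes on version B (the rewrite author's own statement) =====
-- stated objective: alternative
-- what changed: Replaces A's per-cell gather (26 dict lookups per expanded cell via count_neighbors, after building the expanded dict by repeated inserts) with a scatter pass: one loop over the active cells increments a neighbour-counter dict, the key set is collected as keys plus first-seen neighbours, and each output value is a closed-form rule of (current value, counter) instead of an in-place mutation loop.
import Mathlib
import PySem

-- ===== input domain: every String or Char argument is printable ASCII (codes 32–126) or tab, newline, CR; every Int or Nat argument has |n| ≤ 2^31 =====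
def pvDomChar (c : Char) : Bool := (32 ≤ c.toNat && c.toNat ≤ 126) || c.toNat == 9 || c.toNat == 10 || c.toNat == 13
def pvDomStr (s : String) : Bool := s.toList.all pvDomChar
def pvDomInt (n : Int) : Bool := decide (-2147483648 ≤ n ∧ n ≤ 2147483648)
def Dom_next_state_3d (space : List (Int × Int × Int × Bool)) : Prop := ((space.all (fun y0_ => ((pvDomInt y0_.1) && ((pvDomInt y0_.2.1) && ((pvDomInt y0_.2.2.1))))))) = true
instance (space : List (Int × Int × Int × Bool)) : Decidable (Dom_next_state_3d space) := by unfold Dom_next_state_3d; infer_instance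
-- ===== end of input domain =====

-- B replaces A's per-cell gather of 26 neighbour lookups by a single scatter pass over
-- the active cells into a counter dict, then decides each cell by a closed-form rule
-- (alternative algorithm; same return value).

-- shared input/output plumbing: the Python dict {(z,y,x): bool} arrives flattened as 4-tuples
def pvTriple (t : Int × Int × Int × Bool) : (Int × Int × Int) × Bool := ((t.1, t.2.1, t.2.2.1), t.2.2.2)
def pvFlat (p : (Int × Int × Int) × Bool) : Int × Int × Int × Bool := (p.1.1, p.1.2.1, p.1.2.2, p.2)

-- ===== PORT A =====
def get_neighbors_3d (coords : Int × Int × Int) : List (Int × Int × Int) :=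
  ([-1, 0, 1] : List Int).flatMap fun z_offset =>
    ([-1, 0, 1] : List Int).flatMap fun y_offset =>
      ([-1, 0, 1] : List Int).filterMap fun x_offset =>
        if z_offset = 0 ∧ y_offset = 0 ∧ x_offset = 0 then none
        else some (coords.1 + z_offset, coords.2.1 + y_offset, coords.2.2 + x_offset)

def count_neighbors (space : PySem.Dict (Int × Int × Int) Bool) (neighbors : List (Int × Int × Int)) : Int :=
  neighbors.foldl (fun acc n => if space.get? n = some true then acc + 1 else acc) 0

def expand_space_3d (space : PySem.Dict (Int × Int × Int) Bool) : PySem.Dict (Int × Int × Int) Bool :=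
  space.keys.foldl (fun new_space cube =>
    (get_neighbors_3d cube).foldl (fun new_space neighbor =>
      if space.contains neighbor then new_space else new_space.insert neighbor false) new_space) space

def next_state_3d (space : List (Int × Int × Int × Bool)) : List (Int × Int × Int × Bool) :=
  let d := PySem.Dict.ofList (space.map pvTriple)
  let new_space := expand_space_3d d
  let final := new_space.keys.foldl (fun ns cube =>
      let cnt := count_neighbors d (get_neighbors_3d cube)
      if ns.getD cube false = true ∧ ¬(cnt = 2 ∨ cnt = 3) then ns.insert cube false
      else if ns.getD cube false = false ∧ cnt = 3 then ns.insert cube true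
      else ns) new_space
  final.items.map pvFlat

-- ===== PORT B =====
def pvOffsets : List (Int × Int × Int) :=
  ([-1, 0, 1] : List Int).flatMap fun dz =>
    ([-1, 0, 1] : List Int).flatMap fun dy =>
      ([-1, 0, 1] : List Int).filterMap fun dx =>
        if (dz, dy, dx) = ((0 : Int), (0 : Int), (0 : Int)) then none else some (dz, dy, dx)

def pvShift (c o : Int × Int × Int) : Int × Int × Int := (c.1 + o.1, c.2.1 + o.2.1, c.2.2 + o.2.2)

def next_state_3d_alt (space : List (Int × Int × Int × Bool)) : List (Int × Int × Int × Bool) :=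
  let d := PySem.Dict.ofList (space.map pvTriple)
  -- scatter: each active cell adds 1 to all 26 neighbours
  let counter := d.items.foldl (fun ctr p =>
      if p.2 then pvOffsets.foldl (fun ctr o =>
          ctr.insert (pvShift p.1 o) (ctr.getD (pvShift p.1 o) 0 + 1)) ctr
      else ctr) (PySem.Dict.empty : PySem.Dict (Int × Int × Int) Int)
  -- key set: existing keys, then neighbours of every key in first-seen order
  let st := d.keys.foldl (fun st cube =>
      pvOffsets.foldl (fun (st : List (Int × Int × Int) × PySem.Set (Int × Int × Int)) o =>
        if pvShift cube o ∈ st.2 then st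
        else (st.1 ++ [pvShift cube o], PySem.Set.add st.2 (pvShift cube o))) st)
      (d.keys, PySem.Set.ofList d.keys)
  let result := st.1.foldl (fun r c =>
      r.insert c (decide (counter.getD c 0 = 3) || (d.getD c false && decide (counter.getD c 0 = 2))))
      (PySem.Dict.empty : PySem.Dict (Int × Int × Int) Bool)
  result.items.map pvFlat

-- ===== PRECONDITION & SPEC =====
def Spec_next_state_3d (space : List (Int × Int × Int × Bool)) (out : List (Int × Int × Int × Bool)) : Prop := out = next_state_3d_alt space
instance (space : List (Int × Int × Int × Bool)) (out : List (Int × Int × Int × Bool)) : Decidable (Spec_next_state_3d space out) := by unfold Spec_next_state_3d; infer_instance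

-- ===== CLAIM (what is proved, stated in full; the proofs are below) =====
def Claim_equal_next_state_3d : Prop := ∀ (space : List (Int × Int × Int × Bool)), Dom_next_state_3d space → Spec_next_state_3d space (next_state_3d space)

-- ===== LEMMAS AND PROOFS =====

-- the life/death rule applied by A's final loop, as a function of old value and count
def pvRule (v : Bool) (cnt : Int) : Bool :=
  if v = true ∧ ¬(cnt = 2 ∨ cnt = 3) then false
  else if v = false ∧ cnt = 3 then true
  else v

theorem pv_neighbors_eq (c : Int × Int × Int) :
    get_neighbors_3d c = pvOffsets.map (pvShift c) := rfl

-- negation maps the offset list into itself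
def pvNeg (o : Int × Int × Int) : Int × Int × Int := (-o.1, -o.2.1, -o.2.2)

theorem pvOffsets_nodup : pvOffsets.Nodup := by decide

theorem pv_neg_mem : ∀ o ∈ pvOffsets, pvNeg o ∈ pvOffsets := by decide

theorem pv_shift_neg (c o : Int × Int × Int) : pvShift (pvShift c o) (pvNeg o) = c := by
  obtain ⟨a, b, cc⟩ := c; obtain ⟨u, v, w⟩ := o
  simp only [pvShift, pvNeg, Prod.mk.injEq]
  refine ⟨by ring, by ring, by ring⟩

theorem pv_neighbors_symm_aux (c x : Int × Int × Int) :
    x ∈ pvOffsets.map (pvShift c) → c ∈ pvOffsets.map (pvShift x) := by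
  intro h
  rw [List.mem_map] at h
  obtain ⟨o, ho, rfl⟩ := h
  exact List.mem_map.2 ⟨pvNeg o, pv_neg_mem o ho, pv_shift_neg c o⟩

theorem pv_neighbors_symm (c x : Int × Int × Int) :
    x ∈ pvOffsets.map (pvShift c) ↔ c ∈ pvOffsets.map (pvShift x) :=
  ⟨pv_neighbors_symm_aux c x, pv_neighbors_symm_aux x c⟩

theorem pv_neighbors_nodup (c : Int × Int × Int) : (pvOffsets.map (pvShift c)).Nodup := by
  apply List.Nodup.map
  · intro o o' he
    obtain ⟨a, b, cc⟩ := o; obtain ⟨a', b', cc'⟩ := o'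
    simp [pvShift, Prod.mk.injEq] at he ⊢
    omega
  · exact pvOffsets_nodup

-- a nodup list counts by membership
theorem pv_count_nodup (l : List (Int × Int × Int)) (h : l.Nodup) (a : Int × Int × Int) :
    l.count a = if a ∈ l then 1 else 0 := by
  split
  · exact List.count_eq_one_of_mem h (by assumption)
  · exact List.count_eq_zero_of_not_mem (by assumption)

-- two nodup lists: |l₁ ∩ l₂| = |l₂ ∩ l₁|
theorem pv_filter_mem_comm (l1 l2 : List (Int × Int × Int))
    (h1 : l1.Nodup) (h2 : l2.Nodup) :
    (l1.filter (· ∈ l2)).length = (l2.filter (· ∈ l1)).length := by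
  apply List.Perm.length_eq
  apply (List.perm_ext_iff_of_nodup (h1.filter _) (h2.filter _)).2
  intro x
  simp [List.mem_filter, and_comm]

-- the scatter loop of B: final counter value at c
theorem pv_scatter (l : List ((Int × Int × Int) × Bool)) (ctr : PySem.Dict (Int × Int × Int) Int)
    (c : Int × Int × Int) :
    (l.foldl (fun ctr p =>
      if p.2 then pvOffsets.foldl (fun ctr o =>
          ctr.insert (pvShift p.1 o) (ctr.getD (pvShift p.1 o) 0 + 1)) ctr
      else ctr) ctr).getD c 0
    = ctr.getD c 0 + (l.map (fun p => if p.2 then (((pvOffsets.map (pvShift p.1)).count c : Int)) else 0)).sum := by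
  induction l generalizing ctr with
  | nil => simp
  | cons p t ih =>
    simp only [List.foldl_cons, List.map_cons, List.sum_cons, ih]
    by_cases hp : p.2
    · simp only [hp, if_true]
      have h2 := PySem.Dict.getD_foldl_insert_add_one (pvOffsets.map (pvShift p.1)) ctr c
      rw [List.foldl_map] at h2
      rw [h2]
      ring
    · simp only [hp, if_false, Bool.false_eq_true]
      ring

-- the gather count of A equals the scatter sum of B
theorem pv_count_eq (d : PySem.Dict (Int × Int × Int) Bool) (hnd : d.keys.Nodup) (c : Int × Int × Int) :
    count_neighbors d (get_neighbors_3d c)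
    = (d.items.map (fun p => if p.2 then (((pvOffsets.map (pvShift p.1)).count c : Int)) else 0)).sum := by
  have hns : (pvOffsets.map (pvShift c)).Nodup := pv_neighbors_nodup c
  have h1 : count_neighbors d (get_neighbors_3d c)
      = ((pvOffsets.map (pvShift c)).countP (fun n => decide (d.get? n = some true)) : Int) := by
    unfold count_neighbors
    rw [pv_neighbors_eq]
    have := PySem.List.foldl_count_if (fun n => decide (d.get? n = some true)) (pvOffsets.map (pvShift c)) 0
    simp only [decide_eq_true_eq] at this
    rw [this]; ring
  rw [h1]
  set ns := pvOffsets.map (pvShift c) with hnsdef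
  set tk := (d.items.filter (fun p => p.2)).map (fun p => p.1) with htk
  have htkn : tk.Nodup := by
    rw [htk]
    exact hnd.sublist (List.Sublist.map _ (List.filter_sublist (l := d.items)))
  have hmemtk : ∀ n, (n, true) ∈ d.items ↔ n ∈ tk := by
    intro n
    rw [htk]
    simp only [List.mem_map, List.mem_filter]
    constructor
    · intro h; exact ⟨(n, true), ⟨h, rfl⟩, rfl⟩
    · rintro ⟨p, ⟨hp, hp2⟩, rfl⟩
      have : p = (p.1, true) := by
        obtain ⟨p1, p2⟩ := p; simp at hp2 ⊢; exact hp2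
      rwa [← this]
  have h2 : ns.countP (fun n => decide (d.get? n = some true)) = ns.countP (fun n => decide (n ∈ tk)) := by
    apply List.countP_congr
    intro n _
    simp only [decide_eq_true_eq]
    rw [PySem.Dict.get?_eq_some_iff_mem_items d n true hnd, hmemtk]
  rw [h2]
  have h3 : ns.countP (fun n => decide (n ∈ tk)) = tk.countP (fun k => decide (k ∈ ns)) := by
    rw [List.countP_eq_length_filter, List.countP_eq_length_filter]
    exact pv_filter_mem_comm ns tk hns htkn
  rw [h3, htk]
  rw [List.countP_map, List.countP_filter]
  have key : ∀ p : (Int × Int × Int) × Bool,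
      (if (decide (p.1 ∈ ns) && p.2) then (1 : Int) else 0)
      = (if p.2 then (((pvOffsets.map (pvShift p.1)).count c : Int)) else 0) := by
    intro p
    by_cases hp : p.2
    · have hcnt : (pvOffsets.map (pvShift p.1)).count c
          = if c ∈ pvOffsets.map (pvShift p.1) then 1 else 0 :=
        pv_count_nodup _ (pv_neighbors_nodup p.1) c
      rw [hcnt]
      by_cases hmem : p.1 ∈ ns
      · have : c ∈ pvOffsets.map (pvShift p.1) := (pv_neighbors_symm c p.1).1 (hnsdef ▸ hmem)
        simp [hp, hmem, this]
      · have : c ∉ pvOffsets.map (pvShift p.1) := by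
          intro hc
          exact hmem (hnsdef ▸ ((pv_neighbors_symm c p.1).2 hc))
        simp [hp, hmem, this]
    · simp [hp]
  induction d.items with
  | nil => simp
  | cons p t ihh =>
    simp only [List.countP_cons, List.map_cons, List.sum_cons]
    push_cast
    rw [← ihh, ← key p]
    by_cases h : (decide (p.1 ∈ ns) && p.2) <;> simp [h] <;> ring

-- parallel folds over the same list preserve a relation preserved by the steps
theorem pv_foldl_sync {α α' β : Type} (R : α → α' → Prop) (g : α → β → α) (g' : α' → β → α')
    (h : ∀ a a' b, R a a' → R (g a b) (g' a' b)) :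
    ∀ (l : List β) (a : α) (a' : α'), R a a' → R (l.foldl g a) (l.foldl g' a') := by
  intro l
  induction l with
  | nil => intro a a' ha; exact ha
  | cons b t ih => intro a a' ha; exact ih _ _ (h _ _ _ ha)

-- a fold preserves an invariant preserved by its step
theorem pv_foldl_pres {α β : Type} (P : α → Prop) (g : α → β → α)
    (h : ∀ a b, P a → P (g a b)) :
    ∀ (l : List β) (a : α), P a → P (l.foldl g a) := by
  intro l
  induction l with
  | nil => intro a ha; exact ha
  | cons b t ih => intro a ha; exact ih _ (h _ _ ha)

-- the expansion invariant of A's expand_space_3d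
def pvExpInv (d ns : PySem.Dict (Int × Int × Int) Bool) : Prop :=
  ns.keys.Nodup ∧ (∀ c, ns.getD c false = d.getD c false) ∧
    (∀ k, d.contains k = true → ns.contains k = true)

theorem pv_exp_step (d ns : PySem.Dict (Int × Int × Int) Bool) (n : Int × Int × Int)
    (h : pvExpInv d ns) :
    pvExpInv d (if d.contains n then ns else ns.insert n false) := by
  obtain ⟨h1, h2, h3⟩ := h
  by_cases hc : d.contains n
  · simpa [hc] using ⟨h1, h2, h3⟩
  · simp only [hc, if_false, Bool.false_eq_true]
    refine ⟨PySem.Dict.nodup_keys_insert ns n false h1, ?_, ?_⟩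
    · intro c
      rw [PySem.Dict.getD_insert]
      split
      · rename_i hEq
        subst hEq
        exact (PySem.Dict.getD_of_not_contains d false (by simpa using hc)).symm
      · exact h2 c
    · intro k hk
      rw [PySem.Dict.contains_insert]
      simp [h3 k hk]

theorem pv_expand_inv (d : PySem.Dict (Int × Int × Int) Bool) (hnd : d.keys.Nodup) :
    pvExpInv d (expand_space_3d d) := by
  unfold expand_space_3d
  apply pv_foldl_pres (pvExpInv d)
  · intro ns cube hi
    apply pv_foldl_pres (pvExpInv d)
    · intro ns' n hi'
      exact pv_exp_step d ns' n hi'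
    · exact hi
  · exact ⟨hnd, fun c => rfl, fun k hk => hk⟩

-- the key-list sync between A's expand and B's coords accumulator
def pvSync (d : PySem.Dict (Int × Int × Int) Bool)
    (st : List (Int × Int × Int) × PySem.Set (Int × Int × Int))
    (ns : PySem.Dict (Int × Int × Int) Bool) : Prop :=
  st.1 = ns.keys ∧ (∀ x, x ∈ st.2 ↔ x ∈ ns.keys) ∧
    (∀ k, d.contains k = true → ns.contains k = true)

theorem pv_sync_step (d : PySem.Dict (Int × Int × Int) Bool)
    (st : List (Int × Int × Int) × PySem.Set (Int × Int × Int))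
    (ns : PySem.Dict (Int × Int × Int) Bool) (n : Int × Int × Int)
    (h : pvSync d st ns) :
    pvSync d (if n ∈ st.2 then st else (st.1 ++ [n], PySem.Set.add st.2 n))
      (if d.contains n then ns else ns.insert n false) := by
  obtain ⟨h1, h2, h3⟩ := h
  by_cases hm : n ∈ st.2
  · have hkeys : n ∈ ns.keys := (h2 n).1 hm
    have hcont : ns.contains n = true := (PySem.Dict.contains_iff_mem_keys ns n).2 hkeys
    by_cases hc : d.contains n
    · simp only [hm, if_true, hc]
      exact ⟨h1, h2, h3⟩
    · simp only [hm, if_true, hc, if_false, Bool.false_eq_true]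
      refine ⟨?_, ?_, ?_⟩
      · rw [PySem.Dict.keys_insert_of_contains ns false hcont]; exact h1
      · intro x; rw [PySem.Dict.keys_insert_of_contains ns false hcont]; exact h2 x
      · intro k hk
        rw [PySem.Dict.contains_insert]
        simp [h3 k hk]
  · have hkeys : n ∉ ns.keys := fun hx => hm ((h2 n).2 hx)
    have hcont : ns.contains n = false := by
      rcases hb : ns.contains n with _ | _
      · rfl
      · exact absurd ((PySem.Dict.contains_iff_mem_keys ns n).1 hb) hkeys
    have hc : d.contains n = false := by
      rcases hb : d.contains n with _ | _
      · rfl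
      · rw [h3 n hb] at hcont; cases hcont
    simp only [hm, if_false, hc, Bool.false_eq_true]
    refine ⟨?_, ?_, ?_⟩
    · rw [PySem.Dict.keys_insert_of_not_contains ns false hcont, h1]
    · intro x
      rw [PySem.Dict.keys_insert_of_not_contains ns false hcont]
      simp only [PySem.Set.mem_add, List.mem_append, List.mem_singleton, h2 x]
    · intro k hk
      rw [PySem.Dict.contains_insert]
      simp [h3 k hk]

theorem pv_coords_eq (d : PySem.Dict (Int × Int × Int) Bool) :
    (d.keys.foldl (fun st cube =>
      pvOffsets.foldl (fun (st : List (Int × Int × Int) × PySem.Set (Int × Int × Int)) o =>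
        if pvShift cube o ∈ st.2 then st
        else (st.1 ++ [pvShift cube o], PySem.Set.add st.2 (pvShift cube o))) st)
      (d.keys, PySem.Set.ofList d.keys)).1 = (expand_space_3d d).keys := by
  have main : pvSync d
      (d.keys.foldl (fun st cube =>
        pvOffsets.foldl (fun (st : List (Int × Int × Int) × PySem.Set (Int × Int × Int)) o =>
          if pvShift cube o ∈ st.2 then st
          else (st.1 ++ [pvShift cube o], PySem.Set.add st.2 (pvShift cube o))) st)
        (d.keys, PySem.Set.ofList d.keys))
      (expand_space_3d d) := by
    unfold expand_space_3d
    apply pv_foldl_sync (pvSync d)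
    · intro st ns cube hs
      rw [pv_neighbors_eq]
      rw [← List.foldl_map (f := pvShift cube)
        (g := fun (st : List (Int × Int × Int) × PySem.Set (Int × Int × Int)) n =>
          if n ∈ st.2 then st else (st.1 ++ [n], PySem.Set.add st.2 n))]
      apply pv_foldl_sync (pvSync d)
      · intro st' ns' n hs'
        exact pv_sync_step d st' ns' n hs'
      · exact hs
    · refine ⟨rfl, ?_, fun k hk => hk⟩
      intro x; simp [PySem.Set.mem_ofList]
  exact main.1

-- A's final loop, one key at a time
def pvStep (d ns : PySem.Dict (Int × Int × Int) Bool) (cube : Int × Int × Int) :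
    PySem.Dict (Int × Int × Int) Bool :=
  if ns.getD cube false = true ∧ ¬(count_neighbors d (get_neighbors_3d cube) = 2 ∨
      count_neighbors d (get_neighbors_3d cube) = 3) then ns.insert cube false
  else if ns.getD cube false = false ∧ count_neighbors d (get_neighbors_3d cube) = 3 then
    ns.insert cube true
  else ns

theorem pv_final_loop (d : PySem.Dict (Int × Int × Int) Bool) :
    ∀ (l : List (Int × Int × Int)) (g : PySem.Dict (Int × Int × Int) Bool),
      (∀ c ∈ l, g.contains c = true) → l.Nodup →
      (l.foldl (pvStep d) g).keys = g.keys ∧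
      (∀ c, (l.foldl (pvStep d) g).getD c false
        = if c ∈ l then pvRule (g.getD c false) (count_neighbors d (get_neighbors_3d c))
          else g.getD c false) := by
  intro l
  induction l with
  | nil =>
    intro g _ _
    exact ⟨rfl, fun c => by simp⟩
  | cons cube t ih =>
    intro g hsub hnd
    rw [List.nodup_cons] at hnd
    obtain ⟨hcnot, hndt⟩ := hnd
    have hc : g.contains cube = true := hsub cube List.mem_cons_self
    have hkeys : (pvStep d g cube).keys = g.keys := by
      unfold pvStep
      split
      · exact PySem.Dict.keys_insert_of_contains g false hc
      · split
        · exact PySem.Dict.keys_insert_of_contains g true hc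
        · rfl
    have hself : (pvStep d g cube).getD cube false
        = pvRule (g.getD cube false) (count_neighbors d (get_neighbors_3d cube)) := by
      unfold pvStep pvRule
      split
      · rw [PySem.Dict.getD_insert_self]
      · split
        · rw [PySem.Dict.getD_insert_self]
        · rfl
    have hother : ∀ c, c ≠ cube → (pvStep d g cube).getD c false = g.getD c false := by
      intro c hne
      unfold pvStep
      split
      · rw [PySem.Dict.getD_insert]; simp [hne]
      · split
        · rw [PySem.Dict.getD_insert]; simp [hne]
        · rfl
    have hsubt : ∀ c ∈ t, (pvStep d g cube).contains c = true := by
      intro c hct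
      rw [PySem.Dict.contains_iff_mem_keys, hkeys, ← PySem.Dict.contains_iff_mem_keys]
      exact hsub c (List.mem_cons_of_mem _ hct)
    obtain ⟨ihk, ihv⟩ := ih (pvStep d g cube) hsubt hndt
    constructor
    · rw [List.foldl_cons, ihk, hkeys]
    · intro c
      rw [List.foldl_cons, ihv c]
      by_cases hct : c ∈ t
      · have hne : c ≠ cube := fun he => hcnot (he ▸ hct)
        rw [hother c hne]
        simp [hct, List.mem_cons, hne]
      · by_cases hcc : c = cube
        · subst hcc
          simp [hct, hself]
        · rw [hother c hcc]
          simp [hct, hcc]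

-- B's decision formula is A's rule
theorem pv_rule_formula (v : Bool) (cnt : Int) :
    pvRule v cnt = (decide (cnt = 3) || (v && decide (cnt = 2))) := by
  cases v <;> by_cases h2 : cnt = 2 <;> by_cases h3 : cnt = 3 <;> simp [pvRule, h2, h3]

-- ===== VERDICT (by name: the statement is the Claim_ definition above) =====
theorem next_state_3d_spec : Claim_equal_next_state_3d := by
  unfold Claim_equal_next_state_3d
  intro space _
  unfold Spec_next_state_3d
  simp only [next_state_3d, next_state_3d_alt]
  set d := PySem.Dict.ofList (space.map pvTriple) with hd
  have hnd : d.keys.Nodup := PySem.Dict.nodup_keys_ofList _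
  obtain ⟨hEnd, hEval, _⟩ := pv_expand_inv d hnd
  set E := expand_space_3d d with hE
  -- the A-side fold body is pvStep d
  have hstep : (fun ns cube =>
      if ns.getD cube false = true ∧ ¬(count_neighbors d (get_neighbors_3d cube) = 2 ∨
          count_neighbors d (get_neighbors_3d cube) = 3) then ns.insert cube false
      else if ns.getD cube false = false ∧ count_neighbors d (get_neighbors_3d cube) = 3 then
        ns.insert cube true
      else ns) = pvStep d := rfl
  have hsubE : ∀ c ∈ E.keys, E.contains c = true :=
    fun c hcmem => (PySem.Dict.contains_iff_mem_keys E c).2 hcmem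
  obtain ⟨hk, hv⟩ := pv_final_loop d E.keys E hsubE hEnd
  have hfnodup : (E.keys.foldl (pvStep d) E).keys.Nodup := by rw [hk]; exact hEnd
  rw [hstep, pv_coords_eq d, ← hE,
    PySem.Dict.items_eq_map_keys _ hfnodup false, hk]
  set counter := d.items.foldl (fun ctr p =>
      if p.2 then pvOffsets.foldl (fun ctr o =>
          ctr.insert (pvShift p.1 o) (ctr.getD (pvShift p.1 o) 0 + 1)) ctr
      else ctr) (PySem.Dict.empty : PySem.Dict (Int × Int × Int) Int) with hctr
  have hbitems : (E.keys.foldl (fun r c =>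
      r.insert c (decide (counter.getD c 0 = 3) || (d.getD c false && decide (counter.getD c 0 = 2))))
      PySem.Dict.empty).items
      = E.keys.map (fun c =>
          (c, decide (counter.getD c 0 = 3) || (d.getD c false && decide (counter.getD c 0 = 2)))) := by
    have := PySem.Dict.items_foldl_insert_fresh E.keys (fun a => a)
      (fun c => decide (counter.getD c 0 = 3) || (d.getD c false && decide (counter.getD c 0 = 2)))
      PySem.Dict.empty (fun a _ => PySem.Dict.contains_empty a) (by simpa using hEnd)
    simpa using this
  rw [hbitems, List.map_map, List.map_map]
  apply List.map_congr_left
  intro k hkmem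
  have hcnt : counter.getD k 0 = count_neighbors d (get_neighbors_3d k) := by
    rw [hctr, pv_scatter, PySem.Dict.getD_empty, pv_count_eq d hnd k]
    ring
  have hval : (E.keys.foldl (pvStep d) E).getD k false
      = pvRule (d.getD k false) (count_neighbors d (get_neighbors_3d k)) := by
    rw [hv k, if_pos hkmem, hEval k]
  simp only [Function.comp, pvFlat]
  rw [hval, hcnt, pv_rule_formula]
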